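-- pv_equiv track=rewrite | github.com/saxen-dev/safeai-purdue-capstone1 | extraction_mvp_v2.py | _derive_page_map
-- ===== SOURCE A (Python) =====
-- def _derive_page_map(page_ranges):
--     """Map subset page numbers (1-indexed) → original PDF page numbers.
--
--     Returns None if page_ranges is None (full-document mode).
--     """
--     if not page_ranges:
--         return None
--     page_map = {}
--     subset_page = 1
--     for start, end in page_ranges:
--         for orig in range(start, end + 1):
--             page_map[subset_page] = orig
--             subset_page += 1
--     return page_map
-- ===== SOURCE B (Python) =====
-- def _derive_page_map(page_ranges):
--     """Map subset page numbers (1-indexed) -> original PDF page numbers.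
--
--     Returns None if page_ranges is None (full-document mode).
--     """
--     if not page_ranges:
--         return None
--
--     def go(ranges, next_key):
--         if not ranges:
--             return {}
--         start, end = ranges[0]
--         head = {next_key + i: start + i for i in range(end - start + 1)}
--         head.update(go(ranges[1:], next_key + len(head)))
--         return head
--
--     return go(page_ranges, 1)
-- ===== Notes on version B (the rewrite author's own statement) =====
-- stated objective: alternative
-- what changed: Replaces A's single nested loop threading a mutable subset_page counter through one growing dict by structural recursion on the list of ranges: each step builds its own range's sub-dict with a closed-form dict comprehension keyed by next_key+i and merges the recursively built tail via dict.update, the offset for the tail coming from len(head) instead of a running counter.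
import Mathlib
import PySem

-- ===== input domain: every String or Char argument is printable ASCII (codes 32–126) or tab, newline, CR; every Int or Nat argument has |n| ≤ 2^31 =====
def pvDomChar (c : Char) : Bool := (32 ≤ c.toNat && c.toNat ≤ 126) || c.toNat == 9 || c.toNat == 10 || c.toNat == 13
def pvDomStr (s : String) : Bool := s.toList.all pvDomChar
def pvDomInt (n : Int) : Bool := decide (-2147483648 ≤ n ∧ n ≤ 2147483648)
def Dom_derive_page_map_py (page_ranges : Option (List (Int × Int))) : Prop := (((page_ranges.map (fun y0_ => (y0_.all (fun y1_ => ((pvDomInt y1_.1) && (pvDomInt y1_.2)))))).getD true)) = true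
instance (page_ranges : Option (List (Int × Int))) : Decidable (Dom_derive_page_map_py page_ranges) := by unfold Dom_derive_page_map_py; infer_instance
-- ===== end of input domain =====

-- B replaces A's nested loop with a threaded counter by structural recursion on the ranges:
-- each step builds its range's sub-dict by a closed-form comprehension and merges the recursive tail with dict.update.
-- ===== PORT A =====
def derive_page_map_py (page_ranges : Option (List (Int × Int))) : Option (List (Int × Int)) :=
  match page_ranges with
  | none => none
  | some [] => none
  | some prs =>
    let st := prs.foldl
      (fun (st : PySem.Dict Int Int × Int) pr =>
        (PySem.List.pyRange pr.1 (pr.2 + 1) 1).foldl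
          (fun (st : PySem.Dict Int Int × Int) orig => (st.1.insert st.2 orig, st.2 + 1)) st)
      (PySem.Dict.empty, 1)
    some st.1.items

-- ===== PORT B =====
-- helper 'go': {next_key + i: start + i for i in range(end - start + 1)}, then head.update(go(rest, next_key + len(head)))
def dpmGo (ranges : List (Int × Int)) (next_key : Int) : PySem.Dict Int Int :=
  match ranges with
  | [] => PySem.Dict.empty
  | (start, stop) :: rest =>
    let head := (PySem.List.pyRange 0 (stop - start + 1) 1).foldl
      (fun (d : PySem.Dict Int Int) i => d.insert (next_key + i) (start + i)) PySem.Dict.empty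
    head.update (dpmGo rest (next_key + (head.size : Int))).items

def derive_page_map_py_alt (page_ranges : Option (List (Int × Int))) : Option (List (Int × Int)) :=
  match page_ranges with
  | none => none
  | some prs =>
    if prs.isEmpty then none
    else some (dpmGo prs 1).items

-- ===== PRECONDITION & SPEC =====
def Spec_derive_page_map_py (page_ranges : Option (List (Int × Int))) (out : Option (List (Int × Int))) : Prop := out = derive_page_map_py_alt page_ranges
instance (page_ranges : Option (List (Int × Int))) (out : Option (List (Int × Int))) : Decidable (Spec_derive_page_map_py page_ranges out) := by unfold Spec_derive_page_map_py; infer_instance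

-- ===== CLAIM =====
def Claim_equal_derive_page_map_py : Prop := ∀ (page_ranges : Option (List (Int × Int))), Dom_derive_page_map_py page_ranges → Spec_derive_page_map_py page_ranges (derive_page_map_py page_ranges)

-- ===== LEMMAS AND PROOFS =====

-- the flat ordered list of original page numbers
def pvFlat (prs : List (Int × Int)) : List Int :=
  prs.flatMap (fun pr => PySem.List.pyRange pr.1 (pr.2 + 1) 1)

-- A side: the nested loop from (dict of enumerate pre, 1 + |pre|) extends pre by the range's pages
lemma pv_inner (xs : List Int) : ∀ (pre : List Int),
    xs.foldl (fun (st : PySem.Dict Int Int × Int) orig => (st.1.insert st.2 orig, st.2 + 1))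
      (PySem.Dict.mk (PySem.List.enumerate pre 1), 1 + (pre.length : Int))
    = (PySem.Dict.mk (PySem.List.enumerate (pre ++ xs) 1), 1 + ((pre ++ xs).length : Int)) := by
  induction xs with
  | nil => intro pre; simp
  | cons x xs ih =>
    intro pre
    have hc : (PySem.Dict.mk (PySem.List.enumerate pre 1)).contains (1 + (pre.length : Int)) = false := by
      rw [PySem.Dict.contains_eq_decide_mem_keys]
      simp [PySem.Dict.keys_mk, PySem.List.mem_enumerate_iff]
    have hins : (PySem.Dict.mk (PySem.List.enumerate pre 1)).insert (1 + (pre.length : Int)) x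
        = PySem.Dict.mk (PySem.List.enumerate (pre ++ [x]) 1) := by
      apply PySem.Dict.ext
      rw [PySem.Dict.items_insert_of_not_contains _ _ hc]
      simp [PySem.List.enumerate_append, PySem.List.enumerate_cons]
    simp only [List.foldl_cons, hins]
    have : (1 + (pre.length : Int)) + 1 = 1 + ((pre ++ [x]).length : Int) := by
      simp; omega
    rw [this, ih (pre ++ [x])]
    simp

lemma pv_outer (prs : List (Int × Int)) : ∀ (pre : List Int),
    prs.foldl
      (fun (st : PySem.Dict Int Int × Int) pr =>
        (PySem.List.pyRange pr.1 (pr.2 + 1) 1).foldl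
          (fun (st : PySem.Dict Int Int × Int) orig => (st.1.insert st.2 orig, st.2 + 1)) st)
      (PySem.Dict.mk (PySem.List.enumerate pre 1), 1 + (pre.length : Int))
    = (PySem.Dict.mk (PySem.List.enumerate (pre ++ pvFlat prs) 1),
       1 + ((pre ++ pvFlat prs).length : Int)) := by
  induction prs with
  | nil => intro pre; simp [pvFlat]
  | cons pr prs ih =>
    intro pre
    simp only [List.foldl_cons]
    rw [pv_inner, ih]
    simp [pvFlat]

-- B side: the comprehension's items are exactly enumerate of the page range
lemma pv_head_items (s e k : Int) :
    ((PySem.List.pyRange 0 (e - s + 1) 1).foldl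
      (fun (d : PySem.Dict Int Int) i => d.insert (k + i) (s + i)) PySem.Dict.empty).items
    = PySem.List.enumerate (PySem.List.pyRange s (e + 1) 1) k := by
  rw [PySem.Dict.items_foldl_insert_fresh (PySem.List.pyRange 0 (e - s + 1) 1)
        (fun i => k + i) (fun i => s + i) PySem.Dict.empty
        (by intro a _; simp [PySem.Dict.contains_empty])
        ((PySem.List.nodup_pyRange_one 0 (e - s + 1)).map (add_right_injective k))]
  have hemp : (PySem.Dict.empty : PySem.Dict Int Int).items = [] := rfl
  rw [hemp, List.nil_append]
  apply List.ext_getElem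
  · simp only [List.length_map, PySem.List.length_pyRange_one, PySem.List.length_enumerate]
    omega
  · intro j h1 h2
    have hj1 : j < ((e - s + 1)).toNat := by
      simpa [PySem.List.length_pyRange_one] using h1
    have hj2 : j < ((e + 1) - s).toNat := by omega
    rw [List.getElem_map, PySem.List.getElem_enumerate, PySem.List.getElem_pyRange_one,
        PySem.List.getElem_pyRange_one]
    simp

-- B side: dpmGo's items are enumerate of the flattened pages
lemma pv_go_items (prs : List (Int × Int)) : ∀ (k : Int),
    (dpmGo prs k).items = PySem.List.enumerate (pvFlat prs) k := by
  induction prs with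
  | nil => intro k; rfl
  | cons pr rest ih =>
    intro k
    obtain ⟨s, e⟩ := pr
    show (let head := (PySem.List.pyRange 0 (e - s + 1) 1).foldl
            (fun (d : PySem.Dict Int Int) i => d.insert (k + i) (s + i)) PySem.Dict.empty
          head.update (dpmGo rest (k + (head.size : Int))).items).items = _
    set R := PySem.List.pyRange s (e + 1) 1 with hR
    set head := (PySem.List.pyRange 0 (e - s + 1) 1).foldl
      (fun (d : PySem.Dict Int Int) i => d.insert (k + i) (s + i)) PySem.Dict.empty with hhead
    have hitems : head.items = PySem.List.enumerate R k := pv_head_items s e k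
    have hsize : (head.size : Int) = (R.length : Int) := by
      simp [PySem.Dict.size, hitems, PySem.List.length_enumerate]
    have hkeys : head.keys = PySem.List.pyRange k (k + R.length) 1 := by
      simp only [PySem.Dict.keys, hitems]
      exact PySem.List.map_fst_enumerate R k
    have htail : (dpmGo rest (k + (head.size : Int))).items
        = PySem.List.enumerate (pvFlat rest) (k + R.length) := by
      rw [hsize, ih]
    -- the tail's keys are ≥ k + |R|, hence fresh in head
    have hfresh : ∀ p ∈ (dpmGo rest (k + (head.size : Int))).items, head.contains p.1 = false := by
      intro p hp
      rw [htail] at hp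
      rw [PySem.List.mem_enumerate_iff] at hp
      obtain ⟨j, hj, rfl⟩ := hp
      rw [PySem.Dict.contains_eq_decide_mem_keys, hkeys]
      simp only [decide_eq_false_iff_not, PySem.List.mem_pyRange_one]
      omega
    have hnd : ((dpmGo rest (k + (head.size : Int))).items.map (·.1)).Nodup := by
      rw [htail, PySem.List.map_fst_enumerate]
      exact PySem.List.nodup_pyRange_one _ _
    show (head.update (dpmGo rest (k + (head.size : Int))).items).items = _
    have hupd : (head.update (dpmGo rest (k + (head.size : Int))).items).items
        = head.items ++ (dpmGo rest (k + (head.size : Int))).items := by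
      have h := PySem.Dict.items_foldl_insert_fresh
        (β := Int × Int) (dpmGo rest (k + (head.size : Int))).items
        (fun p => p.1) (fun p => p.2) head hfresh
        (by simpa using hnd)
      simpa using h
    rw [hupd, hitems, htail, ← PySem.List.enumerate_append]
    simp [pvFlat, hR]

-- ===== VERDICT (by name: the statement is the Claim_ definition above) =====
theorem derive_page_map_py_spec : Claim_equal_derive_page_map_py := by
  intro page_ranges _
  unfold Spec_derive_page_map_py derive_page_map_py derive_page_map_py_alt
  match page_ranges with
  | none => rfl
  | some [] => rfl
  | some (pr :: prs) =>
    simp only [List.isEmpty_cons, Bool.false_eq_true, if_false]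
    have h0 : ((PySem.Dict.empty : PySem.Dict Int Int), (1:Int))
        = (PySem.Dict.mk (PySem.List.enumerate ([] : List Int) 1), 1 + (([] : List Int).length : Int)) := by
      simp [PySem.Dict.empty]
    show some ((List.foldl _ ((PySem.Dict.empty : PySem.Dict Int Int), (1:Int)) (pr :: prs)).1.items) = _
    rw [h0, pv_outer, pv_go_items]
    simp
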